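-- pv_equiv track=rewrite | github.com/chirana07/cse-market-intelligence | src/cse_announcements.py | _build_blocks_from_view_details
-- ===== SOURCE A (Python) =====
-- def _build_blocks_from_view_details(lines: list[str]) -> list[list[str]]:
--     blocks = []
--
--     for i, line in enumerate(lines):
--         if "VIEW DETAILS" in line.upper():
--             start = max(0, i - 6)
--             window = lines[start : i + 1]
--             if window:
--                 blocks.append(window)
--
--     # dedupe
--     deduped = []
--     seen = set()
--     for block in blocks:
--         key = " | ".join(block)
--         if key in seen:
--             continue
--         seen.add(key)
--         deduped.append(block)
--
--     return deduped
-- ===== SOURCE B (Python) =====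
-- def _build_blocks_from_view_details(lines: list[str]) -> list[list[str]]:
--     # Sliding 7-line buffer instead of index slicing; dict keyed by the joined
--     # window does the first-occurrence dedup (insertion order = output order).
--     found = {}
--     window = []
--     for line in lines:
--         window.append(line)
--         if len(window) > 7:
--             window.pop(0)
--         if "VIEW DETAILS" in line.upper():
--             found.setdefault(" | ".join(window), window.copy())
--     return list(found.values())
-- ===== Notes on version B (the rewrite author's own statement) =====
-- stated objective: alternative
-- what changed: Replaces A's enumerate+slice window extraction and separate set-based dedup pass with a single streaming pass that maintains a sliding 7-line buffer (no index arithmetic or slicing) and dedupes via an insertion-ordered dict keyed by the joined window, returning its values.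
import Mathlib
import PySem

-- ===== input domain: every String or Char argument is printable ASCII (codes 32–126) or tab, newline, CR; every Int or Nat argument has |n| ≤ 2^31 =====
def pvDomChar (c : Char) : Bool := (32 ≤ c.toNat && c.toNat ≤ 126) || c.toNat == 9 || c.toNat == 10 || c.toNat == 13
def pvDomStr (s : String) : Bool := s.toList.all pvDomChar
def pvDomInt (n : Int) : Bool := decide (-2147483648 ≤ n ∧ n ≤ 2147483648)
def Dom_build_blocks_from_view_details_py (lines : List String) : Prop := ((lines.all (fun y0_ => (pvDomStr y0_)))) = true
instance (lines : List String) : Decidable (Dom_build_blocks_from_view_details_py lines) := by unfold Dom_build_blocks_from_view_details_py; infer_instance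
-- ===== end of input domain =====

-- B replaces A's enumerate+slice extraction followed by a separate set-based dedup pass with one
-- streaming pass over the lines keeping a sliding 7-line buffer and deduping through an
-- insertion-ordered dict keyed by the joined window; objective: alternative (same output).


-- ===== PORT A =====
def build_blocks_from_view_details_py (lines : List String) : List (List String) :=
  -- pass 1: collect windows around every "VIEW DETAILS" line
  let blocks : List (List String) :=
    (PySem.List.enumerate lines 0).foldl
      (fun blocks p =>
        if PySem.Str.isIn "VIEW DETAILS" (PySem.Str.upper p.2) then
          let start : Int := max 0 (p.1 - 6)
          let window := PySem.List.slice lines (some start) (some (p.1 + 1))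
          if window ≠ [] then blocks ++ [window] else blocks
        else blocks) []
  -- pass 2: dedupe by " | "-joined key
  (blocks.foldl
      (fun (sd : PySem.Set String × List (List String)) block =>
        let key := PySem.Str.join " | " block
        if PySem.Set.contains sd.1 key then sd
        else (PySem.Set.add sd.1 key, sd.2 ++ [block])) ([], [])).2

-- ===== PORT B =====
def build_blocks_from_view_details_py_alt (lines : List String) : List (List String) :=
  -- one streaming pass: sliding ≤7-line buffer ('window.pop(0)' ported by hand as 'drop 1' —
  -- exact: it removes the first element), dedup by dict.setdefault, return the dict's values
  (lines.foldl
      (fun (st : PySem.Dict String (List String) × List String) line =>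
        let window := st.2 ++ [line]
        let window := if window.length > 7 then window.drop 1 else window
        if PySem.Str.isIn "VIEW DETAILS" (PySem.Str.upper line) then
          (PySem.Dict.setdefault st.1 (PySem.Str.join " | " window) window, window)
        else (st.1, window)) (PySem.Dict.empty, [])).1.values

-- ===== PRECONDITION & SPEC =====
def Spec_build_blocks_from_view_details_py (lines : List String) (out : List (List String)) : Prop := out = build_blocks_from_view_details_py_alt lines
instance (lines : List String) (out : List (List String)) : Decidable (Spec_build_blocks_from_view_details_py lines out) := by unfold Spec_build_blocks_from_view_details_py; infer_instance

-- ===== CLAIM (what is proved, stated in full; the proofs are below) =====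
def Claim_equal_build_blocks_from_view_details_py : Prop := ∀ (lines : List String), Dom_build_blocks_from_view_details_py lines → Spec_build_blocks_from_view_details_py lines (build_blocks_from_view_details_py lines)

-- ===== LEMMAS AND PROOFS =====

-- proof-side names for the pieces of the two ports
def pvCond (p : Int × String) : Bool := PySem.Str.isIn "VIEW DETAILS" (PySem.Str.upper p.2)
def pvWin (lines : List String) (p : Int × String) : List String :=
  PySem.List.slice lines (some (max 0 (p.1 - 6))) (some (p.1 + 1))
def pvDStep (sd : PySem.Set String × List (List String)) (block : List String) :
    PySem.Set String × List (List String) :=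
  if PySem.Set.contains sd.1 (PySem.Str.join " | " block) then sd
  else (PySem.Set.add sd.1 (PySem.Str.join " | " block), sd.2 ++ [block])
def pvDictStep (d : PySem.Dict String (List String)) (block : List String) :
    PySem.Dict String (List String) :=
  PySem.Dict.setdefault d (PySem.Str.join " | " block) block
def pvBStep (st : PySem.Dict String (List String) × List String) (line : String) :
    PySem.Dict String (List String) × List String :=
  let window := st.2 ++ [line]
  let window := if window.length > 7 then window.drop 1 else window
  if PySem.Str.isIn "VIEW DETAILS" (PySem.Str.upper line) then
    (PySem.Dict.setdefault st.1 (PySem.Str.join " | " window) window, window)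
  else (st.1, window)

-- the window around a line of the input is never empty (it contains the line itself)
theorem pv_win_ne_nil (lines : List String) (p : Int × String)
    (hp : p ∈ PySem.List.enumerate lines 0) :
    PySem.List.slice lines (some (max 0 (p.1 - 6))) (some (p.1 + 1)) ≠ [] := by
  rw [PySem.List.mem_enumerate_iff] at hp
  obtain ⟨k, hk, rfl⟩ := hp
  dsimp only
  rw [PySem.List.slice_toNat lines (le_max_left 0 _) (by omega)]
  intro h
  have hl := congrArg List.length h
  simp only [List.length_take, List.length_drop, List.length_nil] at hl
  have h1 : max 0 ((0:Int) + (k:Int) - 6) ≤ ((k:Int)) :=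
    max_le (Int.natCast_nonneg k) (by omega)
  have h2 : (max 0 ((0:Int) + (k:Int) - 6)).toNat ≤ k := Int.toNat_le.mpr h1
  generalize (max 0 ((0:Int) + (k:Int) - 6)).toNat = m at h2 hl
  omega

-- A's collection pass produces exactly the windows of the matching lines, in order
theorem pv_collect (lines : List String) (l : List (Int × String))
    (hne : ∀ p ∈ l, PySem.List.slice lines (some (max 0 (p.1 - 6))) (some (p.1 + 1)) ≠ []) :
    ∀ acc : List (List String),
      l.foldl (fun blocks p =>
          if PySem.Str.isIn "VIEW DETAILS" (PySem.Str.upper p.2) then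
            if PySem.List.slice lines (some (max 0 (p.1 - 6))) (some (p.1 + 1)) ≠ [] then
              blocks ++ [PySem.List.slice lines (some (max 0 (p.1 - 6))) (some (p.1 + 1))]
            else blocks
          else blocks) acc
        = acc ++ (l.filter pvCond).map (pvWin lines) := by
  induction l with
  | nil =>
      intro acc
      simp only [List.foldl_nil, List.filter_nil, List.map_nil, List.append_nil]
  | cons x l ih =>
      intro acc
      have hx := hne x (List.mem_cons_self)
      have ih' := ih (fun p hp => hne p (List.mem_cons_of_mem x hp))
      by_cases hc : PySem.Str.isIn "VIEW DETAILS" (PySem.Str.upper x.2) = true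
      · rw [List.foldl_cons, if_pos hc, if_pos hx, ih',
            List.filter_cons_of_pos (show pvCond x = true from hc), List.map_cons]
        simp only [pvWin, List.append_assoc, List.singleton_append]
      · rw [List.foldl_cons, if_neg hc, ih',
            List.filter_cons_of_neg (show ¬ pvCond x = true from hc)]

-- the Python-exact window lines[max(0,k-6):k+1] is the last ≤7 lines of lines.take (k+1)
theorem pv_win_eq_buffer (lines : List String) (k : Nat) :
    pvWin lines ((k : Int), lines.getD k "") = (lines.take (k + 1)).drop (k + 1 - 7) := by
  unfold pvWin
  dsimp only
  rw [PySem.List.slice_toNat lines (le_max_left 0 _) (by omega)]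
  have h1 : (max 0 ((k:Int) - 6)).toNat = k + 1 - 7 := by omega
  have h2 : ((k:Int) + 1).toNat = k + 1 := by omega
  rw [h1, h2, List.drop_take]

-- B's sliding buffer after one more line is the last ≤7 lines of the longer prefix
theorem pv_buffer_step (lines : List String) (k : Nat) (hk : k < lines.length) :
    (let w := (lines.take k).drop (k - 7) ++ [lines[k]];
     if w.length > 7 then w.drop 1 else w) = (lines.take (k + 1)).drop (k + 1 - 7) := by
  have htake : lines.take (k + 1) = lines.take k ++ [lines[k]] := by
    rw [List.take_add_one, List.getElem?_eq_getElem hk]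
    rfl
  have hlen : (lines.take k).length = k := List.length_take_of_le (by omega)
  have hd : (lines.take k).drop (k - 7) ++ [lines[k]] = (lines.take (k + 1)).drop (k - 7) := by
    rw [htake, List.drop_append_of_le_length (by omega)]
  have hlen1 : (lines.take (k + 1)).length = k + 1 := List.length_take_of_le (by omega)
  simp only [hd]
  by_cases h7 : ((lines.take (k + 1)).drop (k - 7)).length > 7
  · rw [if_pos h7, List.drop_drop]
    congr 1
    simp only [List.length_drop, hlen1] at h7
    omega
  · rw [if_neg h7]
    congr 1
    simp only [List.length_drop, hlen1] at h7
    omega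

-- B's fold, started after k processed lines, runs the dict fold over the remaining windows
theorem pv_bfold (lines : List String) :
    ∀ (suf : List String) (k : Nat) (d : PySem.Dict String (List String)),
      lines.drop k = suf →
      (suf.foldl pvBStep (d, (lines.take k).drop (k - 7))).1
        = ((((PySem.List.enumerate lines 0).drop k).filter pvCond).map (pvWin lines)).foldl
            pvDictStep d := by
  intro suf
  induction suf with
  | nil =>
      intro k d hdrop
      have hk : lines.length ≤ k := by
        by_contra hlt
        have := congrArg List.length hdrop
        simp only [List.length_drop, List.length_nil] at this
        omega
      have he : ((PySem.List.enumerate lines 0).drop k) = [] := by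
        apply List.drop_eq_nil_of_le
        rw [PySem.List.length_enumerate]; exact hk
      simp [he]
  | cons x suf ih =>
      intro k d hdrop
      have hk : k < lines.length := by
        by_contra hge
        rw [List.drop_eq_nil_of_le (by omega)] at hdrop
        exact List.cons_ne_nil x suf hdrop.symm
      have hx : lines[k] = x := by
        have h0 := congrArg (fun l => l[0]?) hdrop
        simp only [List.getElem?_drop, Nat.add_zero, List.getElem?_cons_zero,
          List.getElem?_eq_getElem hk, Option.some_inj] at h0
        exact h0
      have hsuf : lines.drop (k + 1) = suf := by
        have h1 : (lines.drop k).drop 1 = suf := by rw [hdrop]; rfl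
        rwa [List.drop_drop] at h1
      -- the enumerate suffix starts with (k, lines[k])
      have henum : (PySem.List.enumerate lines 0).drop k
          = ((k : Int), x) :: (PySem.List.enumerate lines 0).drop (k + 1) := by
        rw [List.drop_eq_getElem_cons (by rw [PySem.List.length_enumerate]; omega)]
        rw [PySem.List.getElem_enumerate lines 0 k (by rw [PySem.List.length_enumerate]; omega)]
        rw [hx, Int.zero_add]
      have hwin : pvWin lines ((k : Int), x)
          = (lines.take (k + 1)).drop (k + 1 - 7) := by
        have := pv_win_eq_buffer lines k
        rwa [List.getD_eq_getElem _ _ hk, hx] at this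
      have hbuf := pv_buffer_step lines k hk
      rw [hx] at hbuf
      rw [List.foldl_cons]
      by_cases hc : PySem.Str.isIn "VIEW DETAILS" (PySem.Str.upper x) = true
      · have hstep : pvBStep (d, (lines.take k).drop (k - 7)) x
            = (pvDictStep d (pvWin lines ((k : Int), x)), (lines.take (k+1)).drop (k+1-7)) := by
          unfold pvBStep pvDictStep
          simp only [hbuf, if_pos hc, hwin]
        rw [hstep, ih (k + 1) _ hsuf, henum,
            List.filter_cons_of_pos (show pvCond ((k:Int), x) = true from hc), List.map_cons,
            List.foldl_cons]
      · have hstep : pvBStep (d, (lines.take k).drop (k - 7)) x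
            = (d, (lines.take (k+1)).drop (k+1-7)) := by
          unfold pvBStep
          simp only [hbuf, if_neg hc]
        rw [hstep, ih (k + 1) _ hsuf, henum,
            List.filter_cons_of_neg (show ¬ pvCond ((k:Int), x) = true from hc)]

-- the dict fold's values are exactly A's set-guarded dedup output
theorem pv_dedupe (W : List (List String)) :
    ∀ (d : PySem.Dict String (List String)),
      (W.foldl pvDictStep d).values = (W.foldl pvDStep (d.keys, d.values)).2 := by
  induction W with
  | nil => intro d; simp
  | cons w W ih =>
      intro d
      rw [List.foldl_cons, List.foldl_cons]
      by_cases hc : PySem.Dict.contains d (PySem.Str.join " | " w) = true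
      · have hset : PySem.Set.contains d.keys (PySem.Str.join " | " w) = true := by
          simp only [PySem.Set.contains_eq_listContains]
          rw [PySem.Dict.contains_iff_mem_keys] at hc
          simpa using hc
        rw [show pvDictStep d w = d from by
              unfold pvDictStep; exact PySem.Dict.setdefault_of_contains d w hc,
            show pvDStep (d.keys, d.values) w = (d.keys, d.values) from by
              unfold pvDStep; rw [if_pos hset]]
        exact ih d
      · have hset : ¬ PySem.Set.contains d.keys (PySem.Str.join " | " w) = true := by
          simp only [PySem.Set.contains_eq_listContains]
          rw [PySem.Dict.contains_iff_mem_keys] at hc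
          simpa using hc
        have hmem : PySem.Str.join " | " w ∉ d.keys := by
          rw [PySem.Dict.contains_iff_mem_keys] at hc
          simpa using hc
        have hins : pvDictStep d w = d.insert (PySem.Str.join " | " w) w := by
          unfold pvDictStep
          exact PySem.Dict.setdefault_of_not_contains d w (by simpa using hc)
        have hitems : (d.insert (PySem.Str.join " | " w) w).items
            = d.items ++ [(PySem.Str.join " | " w, w)] :=
          PySem.Dict.items_insert_of_not_contains d w (by simpa using hc)
        have hkeys : (d.insert (PySem.Str.join " | " w) w).keys
            = d.keys ++ [PySem.Str.join " | " w] := by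
          simp only [PySem.Dict.keys, hitems, List.map_append, List.map_cons, List.map_nil]
        have hvals : (d.insert (PySem.Str.join " | " w) w).values
            = d.values ++ [w] := by
          simp only [PySem.Dict.values, hitems, List.map_append, List.map_cons, List.map_nil]
        rw [hins,
            show pvDStep (d.keys, d.values) w
                = (PySem.Set.add d.keys (PySem.Str.join " | " w), d.values ++ [w]) from by
              unfold pvDStep; rw [if_neg hset],
            PySem.Set.add_of_not_mem hmem, ← hkeys, ← hvals]
        exact ih _

-- ===== VERDICT (by name: the statement is the Claim_ definition above) =====
theorem build_blocks_from_view_details_py_spec : Claim_equal_build_blocks_from_view_details_py := by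
  intro lines _
  unfold Spec_build_blocks_from_view_details_py build_blocks_from_view_details_py
    build_blocks_from_view_details_py_alt
  dsimp only
  rw [pv_collect lines (PySem.List.enumerate lines 0)
        (fun p hp => pv_win_ne_nil lines p hp)]
  have hB := pv_bfold lines lines 0 PySem.Dict.empty (by simp)
  simp only [List.take_zero, Nat.zero_sub, List.drop_nil, List.drop_zero, List.nil_append] at hB ⊢
  have hfoldB : (lines.foldl pvBStep (PySem.Dict.empty, ([] : List String))).1
      = (((PySem.List.enumerate lines 0).filter pvCond).map (pvWin lines)).foldl
          pvDictStep PySem.Dict.empty := hB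
  have hD := pv_dedupe (((PySem.List.enumerate lines 0).filter pvCond).map (pvWin lines))
      PySem.Dict.empty
  -- rewrite both ports to the named steps and combine
  show ((((PySem.List.enumerate lines 0).filter pvCond).map (pvWin lines)).foldl pvDStep
        ([], [])).2
      = (lines.foldl pvBStep (PySem.Dict.empty, [])).1.values
  rw [hfoldB, hD]
  rfl
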